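-- pv_equiv track=rewrite | github.com/kyungeune/programmers | 프로그래머스/2/12985. 예상 대진표/예상 대진표.py | solution
-- ===== SOURCE A (Python) =====
-- import math
--
-- def solution(n,a,b):
--     nextNum = 1  # 다음 대결의 승자 개수
--     a = math.ceil(a / 2)
--     b = math.ceil(b / 2)
--
--     while nextNum > 0:
--         if a == b | (a == 1 and b == 2) | (a == 2 and b == 1):
--             return nextNum
--         else:
--             nextNum += 1
--
--         a = math.ceil(a / 2)
--         b = math.ceil(b / 2)
--
--     return nextNum
-- ===== SOURCE B (Python) =====
-- def solution(n, a, b):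
--     # contestants in slots a and b first share a sub-bracket (= meet) in the
--     # round given by the bit length of (a-1) XOR (b-1)
--     return ((a - 1) ^ (b - 1)).bit_length()
-- ===== Notes on version B (the rewrite author's own statement) =====
-- stated objective: simpler
-- what changed: replaced the round-by-round ceil-halving loop by the closed form ((a-1) ^ (b-1)).bit_length(), the index of the highest differing bit of the zero-based slot numbers
-- outside the precondition, e.g. on solution(8, 3, 3): A returns 1, B returns 0
import Mathlib
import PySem

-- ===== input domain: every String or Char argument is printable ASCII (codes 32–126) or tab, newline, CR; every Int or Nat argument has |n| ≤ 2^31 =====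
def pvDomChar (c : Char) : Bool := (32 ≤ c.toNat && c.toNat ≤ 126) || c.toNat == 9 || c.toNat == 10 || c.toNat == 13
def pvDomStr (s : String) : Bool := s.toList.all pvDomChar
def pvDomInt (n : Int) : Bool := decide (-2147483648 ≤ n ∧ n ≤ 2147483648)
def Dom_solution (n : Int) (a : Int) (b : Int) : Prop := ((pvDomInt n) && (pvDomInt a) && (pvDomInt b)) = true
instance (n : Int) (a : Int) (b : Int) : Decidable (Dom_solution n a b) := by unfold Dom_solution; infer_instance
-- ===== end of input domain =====

-- B replaces A's round-by-round ceil-halving loop by the closed form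
-- ((a-1) ^ (b-1)).bit_length() (objective: simpler).

-- ===== PORT A =====
-- math.ceil(x / 2): float division is exact on Dom (|x| ≤ 2^31 < 2^53), and ceil(x/2) = (x+1) // 2
def solutionCeilHalf (x : Int) : Int := PySem.Int.floordiv (x + 1) 2

-- the 'while nextNum > 0' loop; fuel 64 suffices for every input Pre_ admits
-- (fuel exhaustion falls through to 'return nextNum' like the loop's own exit)
def solutionLoop : Nat → Int → Int → Int → Int
  | 0, nextNum, _, _ => nextNum
  | fuel+1, nextNum, a, b =>
    if nextNum > 0 then
      -- Python: a == b | (a == 1 and b == 2) | (a == 2 and b == 1)  —  '|' binds tighter than '=='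
      if a = PySem.Int.bor (PySem.Int.bor b (if a = 1 ∧ b = 2 then 1 else 0))
                           (if a = 2 ∧ b = 1 then 1 else 0)
      then nextNum
      else solutionLoop fuel (nextNum + 1) (solutionCeilHalf a) (solutionCeilHalf b)
    else nextNum

def solution (n : Int) (a : Int) (b : Int) : Int :=
  solutionLoop 64 1 (solutionCeilHalf a) (solutionCeilHalf b)

-- ===== PORT B =====
def solution_alt (n : Int) (a : Int) (b : Int) : Int :=
  (PySem.Int.bitLength (PySem.Int.bxor (a - 1) (b - 1)) : Int)

-- ===== PRECONDITION & SPEC =====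
-- Pre_ excludes a = b (degenerate same-slot pairing, where A's answer 1 and B's 0 are both
-- arbitrary) and the inputs where exactly one of a, b is ≥ 1, on which A's while loop never
-- terminates (its iterates then converge to 1 and to ≤ 0 respectively and are never equal).
def Pre_solution (n : Int) (a : Int) (b : Int) : Prop := a ≠ b ∧ (1 ≤ a ↔ 1 ≤ b)
instance (n : Int) (a : Int) (b : Int) : Decidable (Pre_solution n a b) := by
  unfold Pre_solution; infer_instance

def pvWitness_solution : Int × Int × Int := (8, 4, 7)

def Spec_solution (n : Int) (a : Int) (b : Int) (out : Int) : Prop := out = solution_alt n a b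
instance (n : Int) (a : Int) (b : Int) (out : Int) : Decidable (Spec_solution n a b out) := by
  unfold Spec_solution; infer_instance

-- ===== CLAIM (what is proved, stated in full; the proofs are below) =====
def Claim_equal_solution : Prop := ∀ (n : Int) (a : Int) (b : Int),
  Dom_solution n a b → Pre_solution n a b → Spec_solution n a b (solution n a b)

-- ===== LEMMAS AND PROOFS =====

-- bit length of a natural number, as an order iff
theorem pvBitLen_le_iff (x k : Nat) : PySem.Int.bitLength (x : Int) ≤ k ↔ x < 2 ^ k := by
  constructor
  · intro h
    have h1 := PySem.Int.lt_two_pow_bitLength (x : Int)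
    have h2 : (2:Nat) ^ PySem.Int.bitLength (x : Int) ≤ 2 ^ k := Nat.pow_le_pow_right (by omega) h
    have h3 : (x : Int).natAbs = x := by simp
    omega
  · intro h
    rcases Nat.eq_zero_or_pos x with rfl | hx
    · simp [PySem.Int.bitLength_zero]
    · by_contra hk
      have hne : (x : Int) ≠ 0 := by exact_mod_cast hx.ne'
      have h2 := PySem.Int.two_pow_bitLength_le (x : Int) hne
      have h3 : (2:Nat) ^ k ≤ 2 ^ (PySem.Int.bitLength (x : Int) - 1) :=
        Nat.pow_le_pow_right (by omega) (by omega)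
      have h4 : (x : Int).natAbs = x := by simp
      omega

-- the halving iterates agree at step k iff the xor of the zero-based slots is < 2^k
theorem pvShift_eq_iff (u v k : Nat) : u >>> k = v >>> k ↔ u ^^^ v < 2 ^ k := by
  rw [← Nat.xor_eq_zero_iff, ← Nat.shiftRight_xor_distrib, Nat.shiftRight_eq_div_pow,
    Nat.div_eq_zero_iff]
  have : 0 < 2 ^ k := Nat.two_pow_pos k
  omega

-- A's comparison 'a == b | (a==1 and b==2) | (a==2 and b==1)' reduces to a = b …
-- … when both iterates are positive (of the form m+1, n+1):
theorem pvCond_pos (m n : Nat) :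
    ((m : Int) + 1 = PySem.Int.bor (PySem.Int.bor ((n : Int) + 1)
        (if (m : Int) + 1 = 1 ∧ (n : Int) + 1 = 2 then 1 else 0))
        (if (m : Int) + 1 = 2 ∧ (n : Int) + 1 = 1 then 1 else 0)) ↔ m = n := by
  by_cases h1 : m = 0 ∧ n = 1
  · obtain ⟨rfl, rfl⟩ := h1; decide
  by_cases h2 : m = 1 ∧ n = 0
  · obtain ⟨rfl, rfl⟩ := h2; decide
  · rw [if_neg (by omega), if_neg (by omega)]
    simp only [PySem.Int.bor_zero]
    omega

-- … and when both iterates are ≤ 0 (of the form -m, -n):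
theorem pvCond_neg (m n : Nat) :
    (-(m : Int) = PySem.Int.bor (PySem.Int.bor (-(n : Int))
        (if -(m : Int) = 1 ∧ -(n : Int) = 2 then 1 else 0))
        (if -(m : Int) = 2 ∧ -(n : Int) = 1 then 1 else 0)) ↔ m = n := by
  rw [if_neg (by omega), if_neg (by omega)]
  simp only [PySem.Int.bor_zero]
  omega

-- the ceil-half step on the two shapes of iterates
theorem pvHalf_pos (m : Nat) : solutionCeilHalf ((m : Int) + 1) = ((m / 2 : Nat) : Int) + 1 := by
  unfold solutionCeilHalf
  rw [PySem.Int.floordiv_eq_ediv_of_pos (by omega)]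
  omega

theorem pvHalf_neg (m : Nat) : solutionCeilHalf (-(m : Int)) = -((m / 2 : Nat) : Int) := by
  unfold solutionCeilHalf
  rw [PySem.Int.floordiv_eq_ediv_of_pos (by omega)]
  omega

-- Python xor on two negative ints, two's complement: (-p-1) ^ (-q-1) = p ^ q
theorem pvBxor_neg (p q : Nat) :
    PySem.Int.bxor (-(p : Int) - 1) (-(q : Int) - 1) = ((p ^^^ q : Nat) : Int) := by
  simp only [PySem.Int.bxor]
  rw [if_neg (by omega), if_neg (by omega)]
  have e1 : (-(-(p : Int) - 1) - 1).toNat = p := by omega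
  have e2 : (-(-(q : Int) - 1) - 1).toNat = q := by omega
  rw [e1, e2]

-- A's loop on positive iterates returns the bit length of u ^^^ v (u, v = zero-based slots)
theorem pvLoop_pos : ∀ (fuel k u v : Nat), 1 ≤ k →
    k ≤ PySem.Int.bitLength ((u ^^^ v : Nat) : Int) →
    PySem.Int.bitLength ((u ^^^ v : Nat) : Int) < k + fuel →
    solutionLoop fuel (k : Int) (((u >>> k : Nat) : Int) + 1) (((v >>> k : Nat) : Int) + 1)
      = ((PySem.Int.bitLength ((u ^^^ v : Nat) : Int) : Nat) : Int) := by
  intro fuel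
  induction fuel with
  | zero => intro k u v h1 h2 h3; omega
  | succ fuel ih =>
    intro k u v h1 h2 h3
    rw [solutionLoop, if_pos (by exact_mod_cast Nat.pos_of_ne_zero (by omega) : (0:Int) < (k:Int))]
    by_cases heq : u >>> k = v >>> k
    · rw [if_pos ((pvCond_pos _ _).mpr heq)]
      have : PySem.Int.bitLength ((u ^^^ v : Nat) : Int) ≤ k :=
        (pvBitLen_le_iff _ _).mpr ((pvShift_eq_iff u v k).mp heq)
      have : k = PySem.Int.bitLength ((u ^^^ v : Nat) : Int) := by omega
      exact_mod_cast congrArg (Nat.cast : Nat → Int) this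
    · rw [if_neg (fun h => heq ((pvCond_pos _ _).mp h))]
      rw [pvHalf_pos, pvHalf_pos, ← Nat.shiftRight_succ, ← Nat.shiftRight_succ]
      have hk : ((k : Int) + 1) = ((k + 1 : Nat) : Int) := by push_cast; ring
      rw [hk]
      have hlt : ¬ u ^^^ v < 2 ^ k := fun h => heq ((pvShift_eq_iff u v k).mpr h)
      have : ¬ PySem.Int.bitLength ((u ^^^ v : Nat) : Int) ≤ k :=
        fun h => hlt ((pvBitLen_le_iff _ _).mp h)
      exact ih (k + 1) u v (by omega) (by omega) (by omega)

-- A's loop on nonpositive iterates (of the form -u, -v, with u, v = negated slots)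
theorem pvLoop_neg : ∀ (fuel k u v : Nat), 1 ≤ k →
    k ≤ PySem.Int.bitLength ((u ^^^ v : Nat) : Int) →
    PySem.Int.bitLength ((u ^^^ v : Nat) : Int) < k + fuel →
    solutionLoop fuel (k : Int) (-((u >>> k : Nat) : Int)) (-((v >>> k : Nat) : Int))
      = ((PySem.Int.bitLength ((u ^^^ v : Nat) : Int) : Nat) : Int) := by
  intro fuel
  induction fuel with
  | zero => intro k u v h1 h2 h3; omega
  | succ fuel ih =>
    intro k u v h1 h2 h3
    rw [solutionLoop, if_pos (by exact_mod_cast Nat.pos_of_ne_zero (by omega) : (0:Int) < (k:Int))]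
    by_cases heq : u >>> k = v >>> k
    · rw [if_pos ((pvCond_neg _ _).mpr heq)]
      have : PySem.Int.bitLength ((u ^^^ v : Nat) : Int) ≤ k :=
        (pvBitLen_le_iff _ _).mpr ((pvShift_eq_iff u v k).mp heq)
      have : k = PySem.Int.bitLength ((u ^^^ v : Nat) : Int) := by omega
      exact_mod_cast congrArg (Nat.cast : Nat → Int) this
    · rw [if_neg (fun h => heq ((pvCond_neg _ _).mp h))]
      rw [pvHalf_neg, pvHalf_neg, ← Nat.shiftRight_succ, ← Nat.shiftRight_succ]
      have hk : ((k : Int) + 1) = ((k + 1 : Nat) : Int) := by push_cast; ring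
      rw [hk]
      have hlt : ¬ u ^^^ v < 2 ^ k := fun h => heq ((pvShift_eq_iff u v k).mpr h)
      have : ¬ PySem.Int.bitLength ((u ^^^ v : Nat) : Int) ≤ k :=
        fun h => hlt ((pvBitLen_le_iff _ _).mp h)
      exact ih (k + 1) u v (by omega) (by omega) (by omega)

-- the xor of two naturals below 2^32 is below 2^32 (via the shift characterisation)
theorem pvXor_bound (u v : Nat) (hu : u < 4294967296) (hv : v < 4294967296) :
    PySem.Int.bitLength ((u ^^^ v : Nat) : Int) ≤ 32 := by
  refine (pvBitLen_le_iff _ 32).mpr ((pvShift_eq_iff u v 32).mp ?_)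
  have h1 : u >>> 32 = 0 := by
    rw [Nat.shiftRight_eq_div_pow]; exact Nat.div_eq_of_lt (by norm_num; omega)
  have h2 : v >>> 32 = 0 := by
    rw [Nat.shiftRight_eq_div_pow]; exact Nat.div_eq_of_lt (by norm_num; omega)
  rw [h1, h2]

theorem pvBitLen_pos (u v : Nat) (h : u ≠ v) :
    1 ≤ PySem.Int.bitLength ((u ^^^ v : Nat) : Int) := by
  by_contra hk
  have : u ^^^ v < 2 ^ 0 := (pvBitLen_le_iff _ 0).mp (by omega)
  exact h (Nat.xor_eq_zero_iff.mp (by omega))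

-- ===== VERDICT (by name: the statement is the Claim_ definition above) =====
theorem solution_spec : Claim_equal_solution := by
  intro n a b hdom hpre
  obtain ⟨hne, hiff⟩ := hpre
  have hdoma : -2147483648 ≤ a ∧ a ≤ 2147483648 := by
    have := hdom; unfold Dom_solution pvDomInt at this; simp at this; tauto
  have hdomb : -2147483648 ≤ b ∧ b ≤ 2147483648 := by
    have := hdom; unfold Dom_solution pvDomInt at this; simp at this; tauto
  unfold Spec_solution solution solution_alt
  by_cases hpos : 1 ≤ a
  · -- both slots ≥ 1: a = u+1, b = v+1 with u, v the zero-based slots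
    have hbpos : 1 ≤ b := hiff.mp hpos
    set u := (a - 1).toNat with hu
    set v := (b - 1).toNat with hv
    have ha : a = (u : Int) + 1 := by omega
    have hb : b = (v : Int) + 1 := by omega
    have huv : u ≠ v := by omega
    have hxa : a - 1 = (u : Int) := by omega
    have hxb : b - 1 = (v : Int) := by omega
    rw [hxa, hxb, PySem.Int.bxor_natCast]
    have hL1 := pvBitLen_pos u v huv
    have hL2 := pvXor_bound u v (by omega) (by omega)
    have e1 : solutionCeilHalf a = ((u >>> 1 : Nat) : Int) + 1 := by
      rw [ha, pvHalf_pos, Nat.shiftRight_one]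
    have e2 : solutionCeilHalf b = ((v >>> 1 : Nat) : Int) + 1 := by
      rw [hb, pvHalf_pos, Nat.shiftRight_one]
    rw [e1, e2]
    have := pvLoop_pos 64 1 u v (by omega) (by omega) (by omega)
    simpa using this
  · -- both slots ≤ 0: a = -u, b = -v with u, v the negated values
    have hbneg : ¬ 1 ≤ b := fun h => hpos (hiff.mpr h)
    set u := (-a).toNat with hu
    set v := (-b).toNat with hv
    have ha : a = -(u : Int) := by omega
    have hb : b = -(v : Int) := by omega
    have huv : u ≠ v := by omega
    have hxa : a - 1 = -(u : Int) - 1 := by omega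
    have hxb : b - 1 = -(v : Int) - 1 := by omega
    rw [hxa, hxb, pvBxor_neg]
    have hL1 := pvBitLen_pos u v huv
    have hL2 := pvXor_bound u v (by omega) (by omega)
    have e1 : solutionCeilHalf a = -((u >>> 1 : Nat) : Int) := by
      rw [ha, pvHalf_neg, Nat.shiftRight_one]
    have e2 : solutionCeilHalf b = -((v >>> 1 : Nat) : Int) := by
      rw [hb, pvHalf_neg, Nat.shiftRight_one]
    rw [e1, e2]
    have := pvLoop_neg 64 1 u v (by omega) (by omega) (by omega)
    simpa using this
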